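-- pv_equiv track=rewrite | github.com/jayantsingh123/Data_structures | recursion/string_permute_cnt.py | arr_permutations
-- ===== SOURCE A (Python) =====
-- def arr_permutations(arr, low, high):
--     """ find count of permutations of  array
--         cnt variable accumulates count of permutations"""
--     cnt = 0
--     if low == high:
--         cnt += 1
--         return cnt
--     for i in range(low, high+1):
--         arr[i], arr[low] = arr[low], arr[i]
--         cnt += arr_permutations(arr, low+1, high)
--         arr[i], arr[low] = arr[low], arr[i]
--     return cnt
-- ===== SOURCE B (Python) =====
-- def arr_permutations(arr, low, high):
--     """Count permutations of arr[low..high] directly: the count is the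
--     factorial of the segment length, computed by one multiplication loop."""
--     n = high - low + 1
--     if n <= 0:
--         return 0
--     result = 1
--     for k in range(2, n + 1):
--         result *= k
--     return result
-- ===== Notes on version B (the rewrite author's own statement) =====
-- stated objective: alternative
-- what changed: A counts permutations by recursively generating all of them with swap/recurse/swap-back; B returns the closed form factorial(high-low+1) computed by a single multiplication loop (0 when the range is empty).
import Mathlib
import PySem

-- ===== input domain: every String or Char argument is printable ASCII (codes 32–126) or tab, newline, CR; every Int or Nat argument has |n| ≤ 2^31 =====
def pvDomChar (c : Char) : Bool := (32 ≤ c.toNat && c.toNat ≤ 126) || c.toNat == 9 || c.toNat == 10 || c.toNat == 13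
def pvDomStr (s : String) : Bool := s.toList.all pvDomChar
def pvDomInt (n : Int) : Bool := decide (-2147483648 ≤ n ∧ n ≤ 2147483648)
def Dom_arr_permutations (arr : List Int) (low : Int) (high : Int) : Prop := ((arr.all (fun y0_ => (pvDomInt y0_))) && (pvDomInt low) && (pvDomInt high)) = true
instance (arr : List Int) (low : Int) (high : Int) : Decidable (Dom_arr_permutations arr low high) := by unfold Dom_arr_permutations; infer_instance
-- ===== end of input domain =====

-- B replaces A's generate-all-permutations recursion by the closed form
-- factorial(high-low+1) computed with one multiplication loop (objective: alternative).
-- A swaps elements of arr in place but restores them before returning, so the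
-- caller observes no net mutation; the equivalence is about the return value.

-- ===== PORT A =====
-- the simultaneous assignment 'arr[i], arr[low] = arr[low], arr[i]' (exact under
-- Pre_, which puts both indices in range; pyGetD/pySetD are the total forms)
def pvSwap (xs : List Int) (i j : Int) : List Int :=
  let vi := PySem.List.pyGetD xs i 0
  let vj := PySem.List.pyGetD xs j 0
  PySem.List.pySetD (PySem.List.pySetD xs i vj) j vi

-- A's recursion, with fuel (high-low).toNat standing for the recursion depth:
-- fuel 0 is only reached with low ≠ high ∧ high < low, where Python's loop body
-- never runs and cnt = 0 is returned — the same (0, arr) this case yields.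
-- The list is threaded through the state because Python mutates it in place.
def arrPermFuel : Nat → List Int → Int → Int → Int × List Int
  | fuel, arr, low, high =>
    if low = high then (1, arr)
    else
      match fuel with
      | 0 => (0, arr)
      | f + 1 =>
        (PySem.List.pyRange low (high + 1) 1).foldl
          (fun st i =>
            let a1 := pvSwap st.2 i low
            let p := arrPermFuel f a1 (low + 1) high
            (st.1 + p.1, pvSwap p.2 i low))
          (0, arr)

def arr_permutations (arr : List Int) (low : Int) (high : Int) : Int :=
  (arrPermFuel (high - low).toNat arr low high).1

-- ===== PORT B =====
def arr_permutations_alt (arr : List Int) (low : Int) (high : Int) : Int :=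
  let n := high - low + 1
  if n ≤ 0 then 0
  else (PySem.List.pyRange 2 (n + 1) 1).foldl (fun r k => r * k) 1

-- ===== PRECONDITION & SPEC =====
-- Pre_ excludes exactly the inputs where A raises IndexError: low < high with an
-- index of [low, high] outside arr's valid (possibly negative) Python indices.
def Pre_arr_permutations (arr : List Int) (low : Int) (high : Int) : Prop :=
  high ≤ low ∨ (-(PySem.List.len arr) ≤ low ∧ high < PySem.List.len arr)
instance (arr : List Int) (low : Int) (high : Int) : Decidable (Pre_arr_permutations arr low high) := by unfold Pre_arr_permutations; infer_instance

def pvWitness_arr_permutations : List Int × Int × Int := ([3, 1, 2], 0, 2)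

def Spec_arr_permutations (arr : List Int) (low : Int) (high : Int) (out : Int) : Prop := out = arr_permutations_alt arr low high
instance (arr : List Int) (low : Int) (high : Int) (out : Int) : Decidable (Spec_arr_permutations arr low high out) := by unfold Spec_arr_permutations; infer_instance

-- ===== CLAIM (what is proved, stated in full; the proofs are below) =====
def Claim_equal_arr_permutations : Prop := ∀ (arr : List Int) (low : Int) (high : Int), Dom_arr_permutations arr low high → Pre_arr_permutations arr low high → Spec_arr_permutations arr low high (arr_permutations arr low high)

-- ===== LEMMAS AND PROOFS =====

-- A's count is independent of arr: it is 1 at low = high, 0 beyond, else (high-low+1)!.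
theorem arrPermFuel_fst (fuel : Nat) :
    ∀ (low high : Int) (arr : List Int), (high - low).toNat ≤ fuel →
      (arrPermFuel fuel arr low high).1 =
        if low = high then 1
        else if high < low then 0
        else ((high - low + 1).toNat.factorial : Int) := by
  induction fuel with
  | zero =>
    intro low high arr h
    rw [arrPermFuel]
    by_cases he : low = high
    · simp [he]
    · have hlt : high < low := by omega
      simp [he, hlt]
  | succ f ih =>
    intro low high arr h
    rw [arrPermFuel]
    by_cases he : low = high
    · simp [he]
    · simp only [he, if_false]
      by_cases hlt : high < low
      · simp [hlt]
      · have hlh : low < high := by omega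
        simp only [if_neg hlt]
        have hK : ∀ (a : List Int),
            (arrPermFuel f a (low + 1) high).1 = ((high - low).toNat.factorial : Int) := by
          intro a
          rw [ih (low + 1) high a (by omega)]
          by_cases he1 : low + 1 = high
          · have : (high - low).toNat = 1 := by omega
            simp [he1, this]
          · have hlt1 : ¬ high < low + 1 := by omega
            have : (high - (low + 1) + 1).toNat = (high - low).toNat := by omega
            simp [he1, hlt1, this]
        have hfold : ∀ (ℓ : List Int) (c : Int) (a : List Int),
            (ℓ.foldl
              (fun st i =>
                let a1 := pvSwap st.2 i low
                let p := arrPermFuel f a1 (low + 1) high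
                (st.1 + p.1, pvSwap p.2 i low))
              (c, a)).1 = c + ℓ.length * ((high - low).toNat.factorial : Int) := by
          intro ℓ
          induction ℓ with
          | nil => intro c a; simp
          | cons x xs ihl =>
            intro c a
            rw [List.foldl_cons, ihl]
            simp only [hK, List.length_cons]
            push_cast
            ring
        rw [hfold]
        rw [PySem.List.length_pyRange_one]
        have hn : (high + 1 - low).toNat = (high - low).toNat + 1 := by omega
        have hn2 : (high - low + 1).toNat = (high - low).toNat + 1 := by omega
        rw [hn, hn2, Nat.factorial_succ]
        push_cast
        ring

-- B's multiplication loop computes the factorial.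
theorem alt_fold_factorial (n : Nat) :
    (PySem.List.pyRange 2 ((n : Int) + 1) 1).foldl (fun r k => r * k) 1 = (n.factorial : Int) := by
  induction n with
  | zero => decide
  | succ m ihm =>
    by_cases hm : m = 0
    · subst hm; decide
    · have h2 : (2 : Int) ≤ (m : Int) + 1 := by omega
      have : ((m : Int) + 1 + 1) = ((m : Int) + 1) + 1 := by ring
      rw [show ((m + 1 : Nat) : Int) + 1 = ((m : Int) + 1) + 1 by push_cast; ring,
          PySem.List.pyRange_one_succ_right h2, List.foldl_append, ihm]
      simp [Nat.factorial_succ]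
      ring

-- ===== VERDICT (by name: the statement is the Claim_ definition above) =====
theorem arr_permutations_spec : Claim_equal_arr_permutations := by
  intro arr low high _ _
  unfold Spec_arr_permutations arr_permutations arr_permutations_alt
  rw [arrPermFuel_fst (high - low).toNat low high arr (le_refl _)]
  by_cases he : low = high
  · subst he
    simp
  · by_cases hlt : high < low
    · have h0 : high - low + 1 ≤ 0 := by omega
      simp [he, hlt, h0]
    · have hlh : low < high := by omega
      have h0 : ¬ (high - low + 1 ≤ 0) := by omega
      simp only [he, if_false, if_neg hlt, if_neg h0]
      rw [show high - low + 1 + 1 = ((high - low + 1).toNat : Int) + 1 by omega]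
      exact (alt_fold_factorial (high - low + 1).toNat).symm
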